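-- pv_equiv track=rewrite | github.com/tino097/advent-of-code-2024 | src/solutions/test.py | count_unique_antinodes
-- ===== SOURCE A (Python) =====
-- def count_unique_antinodes(map_data):
--     # Parse the map into a dictionary of positions by frequency
--     antennas = {}
--     for y, row in enumerate(map_data):
--         for x, char in enumerate(row):
--             if char != '.':
--                 if char not in antennas:
--                     antennas[char] = []
--                 antennas[char].append((x, y))
--
--     antinodes = set()  # Set to store unique antinode positions
--     max_x = len(map_data[0])
--     max_y = len(map_data)
--
--     # For each frequency, calculate antinodes
--     for freq, positions in antennas.items():
--         n = len(positions)
--         for i in range(n):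
--             for j in range(i + 1, n):
--                 x1, y1 = positions[i]
--                 x2, y2 = positions[j]
--
--                 # Check for horizontal alignment
--                 if y1 == y2:
--                     dist = abs(x2 - x1)
--                     if dist % 3 == 0:  # Valid distance for antinodes
--                         d = dist // 3
--                         mid_x = (x1 + x2) // 2
--                         antinodes.add((x1 + d, y1))
--                         antinodes.add((x2 - d, y1))
--
--                 # Check for vertical alignment
--                 elif x1 == x2:
--                     dist = abs(y2 - y1)
--                     if dist % 3 == 0:  # Valid distance for antinodes
--                         d = dist // 3
--                         mid_y = (y1 + y2) // 2
--                         antinodes.add((x1, y1 + d))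
--                         antinodes.add((x1, y2 - d))
--
--     # Filter antinodes within bounds of the map
--     valid_antinodes = {
--         (x, y) for x, y in antinodes if 0 <= x < max_x and 0 <= y < max_y
--     }
--
--     return len(valid_antinodes)
-- ===== SOURCE B (Python) =====
-- def count_unique_antinodes(map_data):
--     max_y = len(map_data)
--     max_x = len(map_data[0])
--     antinodes = set()
--     for y, row in enumerate(map_data):
--         for x, ch in enumerate(row):
--             if ch == '.':
--                 continue
--             # horizontal partners strictly to the right in the same row
--             for x2 in range(x + 1, len(row)):
--                 if row[x2] == ch and (x2 - x) % 3 == 0: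
--                     d = (x2 - x) // 3
--                     antinodes.add((x + d, y))
--                     antinodes.add((x2 - d, y))
--             # vertical partners strictly below in the same column
--             for y2 in range(y + 1, max_y):
--                 row2 = map_data[y2]
--                 if x < len(row2) and row2[x] == ch and (y2 - y) % 3 == 0:
--                     d = (y2 - y) // 3
--                     antinodes.add((x, y + d))
--                     antinodes.add((x, y2 - d))
--     return sum(1 for (px, py) in antinodes if 0 <= px < max_x and 0 <= py < max_y)
-- ===== Notes on version B (the rewrite author's own statement) =====
-- stated objective: simpler
-- what changed: B drops A's per-frequency dictionary and all-pairs index loops entirely: it scans each non-'.' cell once and looks only rightwards in its row and downwards in its column for a matching character, emitting the same antinode pair set directly.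
import Mathlib
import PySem

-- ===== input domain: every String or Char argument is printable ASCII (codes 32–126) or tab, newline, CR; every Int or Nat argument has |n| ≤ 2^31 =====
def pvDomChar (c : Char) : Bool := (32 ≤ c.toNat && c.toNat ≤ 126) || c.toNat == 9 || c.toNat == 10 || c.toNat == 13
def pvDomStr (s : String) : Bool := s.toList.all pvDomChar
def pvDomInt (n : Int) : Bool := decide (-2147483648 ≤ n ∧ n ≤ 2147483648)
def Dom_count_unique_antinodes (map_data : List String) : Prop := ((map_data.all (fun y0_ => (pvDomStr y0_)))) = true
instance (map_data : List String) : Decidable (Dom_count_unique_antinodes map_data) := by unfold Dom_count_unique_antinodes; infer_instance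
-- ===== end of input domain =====

-- B replaces A's per-frequency dictionary plus all-pairs index loops by a direct per-cell
-- rightward/downward partner scan over the grid (no dictionary, no pair indices); same result.

-- ===== PORT A =====
def count_unique_antinodes (map_data : List String) : Int :=
  let antennas : PySem.Dict Char (List (Int × Int)) :=
    (PySem.List.enumerate map_data).foldl (fun antennas yr =>
      (PySem.List.enumerate yr.2.toList).foldl (fun antennas xc =>
        if xc.2 ≠ '.' then
          let antennas := if ¬ (antennas.contains xc.2 = true) then antennas.insert xc.2 [] else antennas
          antennas.modify xc.2 [] (fun l => l ++ [(xc.1, yr.1)])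
        else antennas) antennas) PySem.Dict.empty
  let max_x : Int := PySem.Str.len ((PySem.List.pyGet? map_data 0).getD "")
  let max_y : Int := PySem.List.len map_data
  let antinodes : PySem.Set (Int × Int) :=
    antennas.items.foldl (fun s fp =>
      let positions := fp.2
      let n : Int := PySem.List.len positions
      (PySem.List.pyRange 0 n 1).foldl (fun s i =>
        (PySem.List.pyRange (i + 1) n 1).foldl (fun s j =>
          let p1 := (PySem.List.pyGet? positions i).getD (0, 0)
          let p2 := (PySem.List.pyGet? positions j).getD (0, 0)
          if p1.2 = p2.2 then
            let dist := |p2.1 - p1.1|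
            if PySem.Int.mod dist 3 = 0 then
              let d := PySem.Int.floordiv dist 3
              (s.add (p1.1 + d, p1.2)).add (p2.1 - d, p1.2)
            else s
          else if p1.1 = p2.1 then
            let dist := |p2.2 - p1.2|
            if PySem.Int.mod dist 3 = 0 then
              let d := PySem.Int.floordiv dist 3
              (s.add (p1.1, p1.2 + d)).add (p1.1, p2.2 - d)
            else s
          else s) s) s) PySem.Set.empty
  let valid := PySem.Set.ofList (antinodes.filter
    (fun p => decide (0 ≤ p.1 ∧ p.1 < max_x ∧ 0 ≤ p.2 ∧ p.2 < max_y)))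
  PySem.List.len valid

-- ===== PORT B =====
def count_unique_antinodes_alt (map_data : List String) : Int :=
  let max_y : Int := PySem.List.len map_data
  let max_x : Int := PySem.Str.len ((PySem.List.pyGet? map_data 0).getD "")
  let antinodes : PySem.Set (Int × Int) :=
    (PySem.List.enumerate map_data).foldl (fun s yr =>
      (PySem.List.enumerate yr.2.toList).foldl (fun s xc =>
        if xc.2 = '.' then s
        else
          let s := (PySem.List.pyRange (xc.1 + 1) (PySem.Str.len yr.2) 1).foldl (fun s x2 =>
            if (PySem.Str.pyGet? yr.2 x2).getD ' ' = xc.2 ∧ PySem.Int.mod (x2 - xc.1) 3 = 0 then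
              let d := PySem.Int.floordiv (x2 - xc.1) 3
              (s.add (xc.1 + d, yr.1)).add (x2 - d, yr.1)
            else s) s
          (PySem.List.pyRange (yr.1 + 1) max_y 1).foldl (fun s y2 =>
            let row2 := (PySem.List.pyGet? map_data y2).getD ""
            if xc.1 < PySem.Str.len row2 ∧ (PySem.Str.pyGet? row2 xc.1).getD ' ' = xc.2 ∧
                PySem.Int.mod (y2 - yr.1) 3 = 0 then
              let d := PySem.Int.floordiv (y2 - yr.1) 3
              (s.add (xc.1, yr.1 + d)).add (xc.1, y2 - d)
            else s) s) s) PySem.Set.empty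
  antinodes.foldl (fun acc p =>
    if 0 ≤ p.1 ∧ p.1 < max_x ∧ 0 ≤ p.2 ∧ p.2 < max_y then acc + 1 else acc) 0

-- ===== PRECONDITION & SPEC =====
-- Pre_ excludes only the empty list, on which the Python A (and B) raises IndexError at map_data[0].
def Pre_count_unique_antinodes (map_data : List String) : Prop := map_data ≠ []
instance (map_data : List String) : Decidable (Pre_count_unique_antinodes map_data) := by
  unfold Pre_count_unique_antinodes; infer_instance
def pvWitness_count_unique_antinodes : List String := ["aA.a", ".a..", "aA.."]

def Spec_count_unique_antinodes (map_data : List String) (out : Int) : Prop := out = count_unique_antinodes_alt map_data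
instance (map_data : List String) (out : Int) : Decidable (Spec_count_unique_antinodes map_data out) := by unfold Spec_count_unique_antinodes; infer_instance

-- ===== CLAIM (what is proved, stated in full; the proofs are below) =====
def Claim_equal_count_unique_antinodes : Prop := ∀ (map_data : List String), Dom_count_unique_antinodes map_data → Pre_count_unique_antinodes map_data → Spec_count_unique_antinodes map_data (count_unique_antinodes map_data)

-- ===== LEMMAS AND PROOFS =====

-- proof-only helper definitions (the sets the two ports build, and a canonical description)

def pvAset (md : List String) : PySem.Set (Int × Int) :=
  let antennas : PySem.Dict Char (List (Int × Int)) :=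
    (PySem.List.enumerate md).foldl (fun antennas yr =>
      (PySem.List.enumerate yr.2.toList).foldl (fun antennas xc =>
        if xc.2 ≠ '.' then
          let antennas := if ¬ (antennas.contains xc.2 = true) then antennas.insert xc.2 [] else antennas
          antennas.modify xc.2 [] (fun l => l ++ [(xc.1, yr.1)])
        else antennas) antennas) PySem.Dict.empty
  antennas.items.foldl (fun s fp =>
    let positions := fp.2
    let n : Int := PySem.List.len positions
    (PySem.List.pyRange 0 n 1).foldl (fun s i =>
      (PySem.List.pyRange (i + 1) n 1).foldl (fun s j =>
        let p1 := (PySem.List.pyGet? positions i).getD (0, 0)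
        let p2 := (PySem.List.pyGet? positions j).getD (0, 0)
        if p1.2 = p2.2 then
          let dist := |p2.1 - p1.1|
          if PySem.Int.mod dist 3 = 0 then
            let d := PySem.Int.floordiv dist 3
            (s.add (p1.1 + d, p1.2)).add (p2.1 - d, p1.2)
          else s
        else if p1.1 = p2.1 then
          let dist := |p2.2 - p1.2|
          if PySem.Int.mod dist 3 = 0 then
            let d := PySem.Int.floordiv dist 3
            (s.add (p1.1, p1.2 + d)).add (p1.1, p2.2 - d)
          else s
        else s) s) s) PySem.Set.empty

def pvBset (md : List String) : PySem.Set (Int × Int) :=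
  (PySem.List.enumerate md).foldl (fun s yr =>
    (PySem.List.enumerate yr.2.toList).foldl (fun s xc =>
      if xc.2 = '.' then s
      else
        let s := (PySem.List.pyRange (xc.1 + 1) (PySem.Str.len yr.2) 1).foldl (fun s x2 =>
          if (PySem.Str.pyGet? yr.2 x2).getD ' ' = xc.2 ∧ PySem.Int.mod (x2 - xc.1) 3 = 0 then
            let d := PySem.Int.floordiv (x2 - xc.1) 3
            (s.add (xc.1 + d, yr.1)).add (x2 - d, yr.1)
          else s) s
        (PySem.List.pyRange (yr.1 + 1) (PySem.List.len md) 1).foldl (fun s y2 =>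
          let row2 := (PySem.List.pyGet? md y2).getD ""
          if xc.1 < PySem.Str.len row2 ∧ (PySem.Str.pyGet? row2 xc.1).getD ' ' = xc.2 ∧
              PySem.Int.mod (y2 - yr.1) 3 = 0 then
            let d := PySem.Int.floordiv (y2 - yr.1) 3
            (s.add (xc.1, yr.1 + d)).add (xc.1, y2 - d)
          else s) s) s) PySem.Set.empty

lemma pvAset_spec (md : List String) : count_unique_antinodes md =
    PySem.List.len (PySem.Set.ofList ((pvAset md).filter
      (fun p => decide (0 ≤ p.1 ∧ p.1 < PySem.Str.len ((PySem.List.pyGet? md 0).getD "") ∧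
        0 ≤ p.2 ∧ p.2 < PySem.List.len md)))) := rfl

lemma pvBset_spec (md : List String) : count_unique_antinodes_alt md =
    (pvBset md).foldl (fun acc p =>
      if 0 ≤ p.1 ∧ p.1 < PySem.Str.len ((PySem.List.pyGet? md 0).getD "") ∧
         0 ≤ p.2 ∧ p.2 < PySem.List.len md then acc + 1 else acc) 0 := rfl

-- canonical description of the grid
def pvCellAt (md : List String) (x y : Int) : Option Char :=
  if 0 ≤ x ∧ 0 ≤ y then (md[y.toNat]?.bind fun r => r.toList[x.toNat]?) else none

def pvCells (md : List String) : List (Int × Int × Char) :=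
  (PySem.List.enumerate md).flatMap (fun yr =>
    (PySem.List.enumerate yr.2.toList).map (fun xc => (xc.1, yr.1, xc.2)))

def pvPar (md : List String) : List (Int × Int × Char) :=
  (pvCells md).filter (fun t => decide (t.2.2 ≠ '.'))

def pvOccs (md : List String) (c : Char) : List (Int × Int) :=
  ((pvPar md).filter (fun t => t.2.2 == c)).map (fun t => (t.1, t.2.1))

def pvKeys (md : List String) : List Char :=
  PySem.Set.ofList ((pvPar md).map (fun t => t.2.2))

def pvRmLt (a b : Int × Int) : Prop := a.2 < b.2 ∨ (a.2 = b.2 ∧ a.1 < b.1)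

def pvQA (a b p : Int × Int) : Prop :=
  if a.2 = b.2 then
    PySem.Int.mod |b.1 - a.1| 3 = 0 ∧
      (p = (a.1 + PySem.Int.floordiv |b.1 - a.1| 3, a.2) ∨
       p = (b.1 - PySem.Int.floordiv |b.1 - a.1| 3, a.2))
  else if a.1 = b.1 then
    PySem.Int.mod |b.2 - a.2| 3 = 0 ∧
      (p = (a.1, a.2 + PySem.Int.floordiv |b.2 - a.2| 3) ∨
       p = (a.1, b.2 - PySem.Int.floordiv |b.2 - a.2| 3))
  else False

def pvEmitH (md : List String) (p : Int × Int) : Prop :=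
  ∃ c x1 x2 y, c ≠ '.' ∧ pvCellAt md x1 y = some c ∧ pvCellAt md x2 y = some c ∧
    x1 < x2 ∧ PySem.Int.mod (x2 - x1) 3 = 0 ∧
    (p = (x1 + PySem.Int.floordiv (x2 - x1) 3, y) ∨
     p = (x2 - PySem.Int.floordiv (x2 - x1) 3, y))

def pvEmitV (md : List String) (p : Int × Int) : Prop :=
  ∃ c x y1 y2, c ≠ '.' ∧ pvCellAt md x y1 = some c ∧ pvCellAt md x y2 = some c ∧
    y1 < y2 ∧ PySem.Int.mod (y2 - y1) 3 = 0 ∧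
    (p = (x, y1 + PySem.Int.floordiv (y2 - y1) 3) ∨
     p = (x, y2 - PySem.Int.floordiv (y2 - y1) 3))

-- generic fold lemmas
lemma pvMemFoldl {α β : Type} (P : β → α → Prop) :
    ∀ (l : List β) (f : List α → β → List α),
      (∀ s b, b ∈ l → ∀ p, (p ∈ f s b ↔ p ∈ s ∨ P b p)) →
      ∀ s p, (p ∈ l.foldl f s ↔ p ∈ s ∨ ∃ b ∈ l, P b p)
  | [], _, _, s, p => by simp
  | b :: l, f, hf, s, p => by
      rw [List.foldl_cons, pvMemFoldl P l f (fun s b hb => hf s b (List.mem_cons_of_mem _ hb)) (f s b) p,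
          hf s b (List.mem_cons_self ..) p]
      simp only [List.mem_cons]
      constructor
      · rintro ((h | h) | ⟨b', hb', h⟩)
        · exact Or.inl h
        · exact Or.inr ⟨b, Or.inl rfl, h⟩
        · exact Or.inr ⟨b', Or.inr hb', h⟩
      · rintro (h | ⟨b', (rfl | hb'), h⟩)
        · exact Or.inl (Or.inl h)
        · exact Or.inl (Or.inr h)
        · exact Or.inr ⟨b', hb', h⟩

lemma pvNodupFoldl {α β : Type} :
    ∀ (l : List β) (f : List α → β → List α),
      (∀ s b, List.Nodup s → List.Nodup (f s b)) → ∀ s, s.Nodup → (l.foldl f s).Nodup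
  | [], _, _, _, hs => hs
  | b :: l, f, hf, s, hs => pvNodupFoldl l f hf (f s b) (hf s b hs)

lemma pvFoldlFlatMap {α β γ : Type} (g : β → List γ) (f : α → γ → α) :
    ∀ (l : List β) (init : α),
      l.foldl (fun a b => (g b).foldl f a) init = (l.flatMap g).foldl f init
  | [], _ => rfl
  | b :: l, init => by
      rw [List.foldl_cons, pvFoldlFlatMap g f l, List.flatMap_cons, List.foldl_append]

-- membership in the canonical cell list
lemma pvMem_cells (md : List String) (x y : Int) (c : Char) :
    (x, y, c) ∈ pvCells md ↔ pvCellAt md x y = some c := by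
  unfold pvCells pvCellAt
  simp only [List.mem_flatMap, List.mem_map, PySem.List.mem_enumerate_iff]
  constructor
  · rintro ⟨yr, ⟨k, hk, rfl⟩, xc, ⟨kx, hkx, rfl⟩, heq⟩
    simp only [Prod.mk.injEq] at heq
    obtain ⟨rfl, rfl, rfl⟩ := heq
    have h0 : ((0 : Int) + (kx : Int)).toNat = kx := by omega
    have h1 : ((0 : Int) + (k : Int)).toNat = k := by omega
    rw [if_pos (by constructor <;> omega), h0, h1]
    simp [hk]
  · intro h
    by_cases hxy : 0 ≤ x ∧ 0 ≤ y
    · rw [if_pos hxy] at h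
      obtain ⟨hx, hy⟩ := hxy
      rcases hrow : md[y.toNat]? with _ | row
      · rw [hrow] at h; simp at h
      · rw [hrow] at h
        simp only [Option.bind_some] at h
        have hylt : y.toNat < md.length := (List.getElem?_eq_some_iff.mp hrow).1
        have hxlt : x.toNat < row.toList.length := (List.getElem?_eq_some_iff.mp h).1
        refine ⟨(y, row), ⟨y.toNat, hylt, by
          simp [Int.toNat_of_nonneg hy, (List.getElem?_eq_some_iff.mp hrow).2]⟩,
          (x, c), ⟨x.toNat, hxlt, by
          simp [Int.toNat_of_nonneg hx, (List.getElem?_eq_some_iff.mp h).2]⟩, by simp⟩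
    · rw [if_neg hxy] at h; simp at h

lemma pvPairwise_cells (md : List String) :
    (pvCells md).Pairwise (fun t u => pvRmLt (t.1, t.2.1) (u.1, u.2.1)) := by
  unfold pvCells
  rw [List.pairwise_flatMap]
  constructor
  · intro yr _
    refine List.Pairwise.map _ ?_ (PySem.List.pairwise_lt_enumerate yr.2.toList 0)
    intro a b hab
    exact Or.inr ⟨rfl, hab⟩
  · refine List.Pairwise.imp ?_ (PySem.List.pairwise_lt_enumerate md 0)
    intro a b hab t ht u hu
    simp only [List.mem_map] at ht hu
    obtain ⟨xc, _, rfl⟩ := ht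
    obtain ⟨xc', _, rfl⟩ := hu
    exact Or.inl hab

lemma pvPairwise_occs (md : List String) (c : Char) : (pvOccs md c).Pairwise pvRmLt := by
  unfold pvOccs pvPar
  refine List.Pairwise.map _ (fun a b h => h) ?_
  exact ((pvPairwise_cells md).filter _).filter _

lemma pvMem_occs (md : List String) (c : Char) (a : Int × Int) :
    a ∈ pvOccs md c ↔ c ≠ '.' ∧ pvCellAt md a.1 a.2 = some c := by
  unfold pvOccs pvPar
  simp only [List.mem_map, List.mem_filter, beq_iff_eq, decide_eq_true_eq]
  constructor
  · rintro ⟨⟨x, y, c'⟩, ⟨⟨hmem, hne⟩, rfl⟩, rfl⟩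
    exact ⟨hne, (pvMem_cells md x y _).mp hmem⟩
  · rintro ⟨hne, hcell⟩
    exact ⟨(a.1, a.2, c), ⟨⟨(pvMem_cells md a.1 a.2 c).mpr hcell, hne⟩, rfl⟩, rfl⟩

lemma pvMem_keys (md : List String) (c : Char) :
    c ∈ pvKeys md ↔ c ≠ '.' ∧ ∃ x y, pvCellAt md x y = some c := by
  unfold pvKeys pvPar
  simp only [PySem.Set.mem_ofList, List.mem_map, List.mem_filter, decide_eq_true_eq]
  constructor
  · rintro ⟨⟨x, y, c'⟩, ⟨hmem, hne⟩, rfl⟩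
    exact ⟨hne, x, y, (pvMem_cells md x y _).mp hmem⟩
  · rintro ⟨hne, x, y, hcell⟩
    exact ⟨(x, y, c), ⟨(pvMem_cells md x y c).mpr hcell, hne⟩, rfl⟩

-- the dictionary A builds, in canonical form
def pvAntennas (md : List String) : PySem.Dict Char (List (Int × Int)) :=
  (pvPar md).foldl (fun d t => d.modify t.2.2 [] (fun l => l ++ [(t.1, t.2.1)])) PySem.Dict.empty

lemma pvStepModify (d : PySem.Dict Char (List (Int × Int))) (k : Char)
    (f : List (Int × Int) → List (Int × Int)) :
    (if ¬ (d.contains k = true) then d.insert k [] else d).modify k [] f = d.modify k [] f := by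
  by_cases h : d.contains k = true
  · rw [if_neg (by simp [h])]
  · rw [if_pos (by simp [h]), PySem.Dict.modify, PySem.Dict.modify,
        PySem.Dict.getD_insert_self, PySem.Dict.insert_insert_self,
        PySem.Dict.getD_of_not_contains d [] (by simpa using h)]

lemma pvAntennas_eq (md : List String) :
    ((PySem.List.enumerate md).foldl (fun antennas yr =>
      (PySem.List.enumerate yr.2.toList).foldl (fun antennas xc =>
        if xc.2 ≠ '.' then
          (if ¬ (antennas.contains xc.2 = true) then antennas.insert xc.2 [] else antennas).modify
            xc.2 [] (fun l => l ++ [(xc.1, yr.1)])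
        else antennas) antennas) PySem.Dict.empty) = pvAntennas md := by
  have h1 : ∀ (yr : Int × String) (d : PySem.Dict Char (List (Int × Int))),
      (PySem.List.enumerate yr.2.toList).foldl (fun antennas xc =>
        if xc.2 ≠ '.' then
          (if ¬ (antennas.contains xc.2 = true) then antennas.insert xc.2 [] else antennas).modify
            xc.2 [] (fun l => l ++ [(xc.1, yr.1)])
        else antennas) d =
      ((PySem.List.enumerate yr.2.toList).map (fun xc => (xc.1, yr.1, xc.2))).foldl
        (fun antennas t =>
          if t.2.2 ≠ '.' then
            (if ¬ (antennas.contains t.2.2 = true) then antennas.insert t.2.2 [] else antennas).modify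
              t.2.2 [] (fun l => l ++ [(t.1, t.2.1)])
          else antennas) d := by
    intro yr d
    rw [List.foldl_map]
  calc (PySem.List.enumerate md).foldl _ PySem.Dict.empty
      = (pvCells md).foldl (fun antennas t =>
          if t.2.2 ≠ '.' then
            (if ¬ (antennas.contains t.2.2 = true) then antennas.insert t.2.2 [] else antennas).modify
              t.2.2 [] (fun l => l ++ [(t.1, t.2.1)])
          else antennas) PySem.Dict.empty := by
        unfold pvCells
        rw [← pvFoldlFlatMap]
        exact PySem.List.foldl_congr_mem _ _ _ _ fun d yr _ => h1 yr d
    _ = (pvPar md).foldl (fun antennas t =>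
          (if ¬ (antennas.contains t.2.2 = true) then antennas.insert t.2.2 [] else antennas).modify
            t.2.2 [] (fun l => l ++ [(t.1, t.2.1)])) PySem.Dict.empty := by
        unfold pvPar
        rw [PySem.List.foldl_ite_eq_foldl_filter]
    _ = pvAntennas md := by
        unfold pvAntennas
        exact PySem.List.foldl_congr_mem _ _ _ _ fun d t _ => pvStepModify d t.2.2 _

lemma pvAntennas_getD (md : List String) (c : Char) :
    (pvAntennas md).getD c [] = pvOccs md c := by
  unfold pvAntennas pvOccs
  have h := PySem.Dict.getD_foldl_modify_append
    ((pvPar md).map (fun t : Int × Int × Char => (t.2.2, (t.1, t.2.1)))) PySem.Dict.empty c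
  rw [List.foldl_map, PySem.Dict.getD_empty, List.filter_map, List.map_map] at h
  exact h

lemma pvAntennas_keys (md : List String) : (pvAntennas md).keys = pvKeys md := by
  unfold pvAntennas pvKeys
  rw [PySem.Dict.keys_foldl_modify_key (pvPar md) (fun t => t.2.2) []
      (fun _ t => fun l => l ++ [(t.1, t.2.1)]) PySem.Dict.empty]
  rw [PySem.Dict.keys_empty, PySem.Set.update_nil_left]

lemma pvAntennas_keys_nodup (md : List String) : (pvAntennas md).keys.Nodup := by
  unfold pvAntennas
  exact PySem.Dict.nodup_keys_foldl_modify_key (pvPar md) (fun t => t.2.2) []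
    (fun _ t => fun l => l ++ [(t.1, t.2.1)]) PySem.Dict.empty (by simp [PySem.Dict.keys_empty])

lemma pvAntennas_items (md : List String) :
    (pvAntennas md).items = (pvKeys md).map (fun c => (c, pvOccs md c)) := by
  rw [PySem.Dict.items_eq_map_keys (pvAntennas md) (pvAntennas_keys_nodup md) [],
      pvAntennas_keys]
  exact List.map_congr_left fun c _ => by rw [pvAntennas_getD]

lemma pvRmLt_irrefl (a : Int × Int) : ¬ pvRmLt a a := by
  unfold pvRmLt; omega

lemma pvRmLt_asymm (a b : Int × Int) : pvRmLt a b → ¬ pvRmLt b a := by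
  unfold pvRmLt; omega

-- indexed all-pairs iteration over a strictly row-major-sorted list = ordered pairs of members
lemma pvIdxPairs (L : List (Int × Int)) (hL : L.Pairwise pvRmLt) (Q : Int × Int → Int × Int → Prop) :
    (∃ i ∈ PySem.List.pyRange 0 (PySem.List.len L) 1,
      ∃ j ∈ PySem.List.pyRange (i + 1) (PySem.List.len L) 1,
        Q ((PySem.List.pyGet? L i).getD (0, 0)) ((PySem.List.pyGet? L j).getD (0, 0))) ↔
    ∃ a b, a ∈ L ∧ b ∈ L ∧ pvRmLt a b ∧ Q a b := by
  constructor
  · rintro ⟨i, hi, j, hj, hQ⟩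
    rw [PySem.List.mem_pyRange_one] at hi hj
    rw [PySem.List.len_eq] at hi hj
    have hi' : i.toNat < L.length := by omega
    have hj' : j.toNat < L.length := by omega
    have hij : i.toNat < j.toNat := by omega
    have e1 : PySem.List.pyGet? L i = some L[i.toNat] := by
      rw [PySem.List.pyGet?_of_nonneg L (by omega : (0:Int) ≤ i), List.getElem?_eq_getElem hi']
    have e2 : PySem.List.pyGet? L j = some L[j.toNat] := by
      rw [PySem.List.pyGet?_of_nonneg L (by omega : (0:Int) ≤ j), List.getElem?_eq_getElem hj']
    rw [e1, e2] at hQ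
    simp only [Option.getD_some] at hQ
    exact ⟨L[i.toNat], L[j.toNat], List.getElem_mem _, List.getElem_mem _,
      List.pairwise_iff_getElem.mp hL _ _ hi' hj' hij, hQ⟩
  · rintro ⟨a, b, ha, hb, hab, hQ⟩
    obtain ⟨ia, hia, rfl⟩ := List.getElem_of_mem ha
    obtain ⟨ib, hib, rfl⟩ := List.getElem_of_mem hb
    have hord : ia < ib := by
      rcases Nat.lt_trichotomy ia ib with h | h | h
      · exact h
      · subst h; exact absurd hab (pvRmLt_irrefl _)
      · exact absurd (List.pairwise_iff_getElem.mp hL _ _ hib hia h) (pvRmLt_asymm _ _ hab)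
    refine ⟨(ia : Int), ?_, (ib : Int), ?_, ?_⟩
    · rw [PySem.List.mem_pyRange_one, PySem.List.len_eq]; omega
    · rw [PySem.List.mem_pyRange_one, PySem.List.len_eq]; omega
    · rw [PySem.List.pyGet?_natCast, PySem.List.pyGet?_natCast,
          List.getElem?_eq_getElem hia, List.getElem?_eq_getElem hib]
      exact hQ

lemma pvBodyA (s : PySem.Set (Int × Int)) (p1 p2 p : Int × Int) :
    (p ∈ if p1.2 = p2.2 then
            if PySem.Int.mod |p2.1 - p1.1| 3 = 0 then
              (s.add (p1.1 + PySem.Int.floordiv |p2.1 - p1.1| 3, p1.2)).add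
                (p2.1 - PySem.Int.floordiv |p2.1 - p1.1| 3, p1.2)
            else s
          else if p1.1 = p2.1 then
            if PySem.Int.mod |p2.2 - p1.2| 3 = 0 then
              (s.add (p1.1, p1.2 + PySem.Int.floordiv |p2.2 - p1.2| 3)).add
                (p1.1, p2.2 - PySem.Int.floordiv |p2.2 - p1.2| 3)
            else s
          else s) ↔ p ∈ s ∨ pvQA p1 p2 p := by
  unfold pvQA
  split_ifs <;> simp_all [PySem.Set.mem_add] <;> tauto

lemma pvAset_mem (md : List String) (p : Int × Int) :
    p ∈ pvAset md ↔
      ∃ c ∈ pvKeys md, ∃ a b, a ∈ pvOccs md c ∧ b ∈ pvOccs md c ∧ pvRmLt a b ∧ pvQA a b p := by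
  simp only [pvAset]
  rw [pvAntennas_eq, pvAntennas_items]
  refine Iff.trans (pvMemFoldl
    (fun fp q => ∃ i ∈ PySem.List.pyRange 0 (PySem.List.len fp.2) 1,
      ∃ j ∈ PySem.List.pyRange (i + 1) (PySem.List.len fp.2) 1,
        pvQA ((PySem.List.pyGet? fp.2 i).getD (0, 0)) ((PySem.List.pyGet? fp.2 j).getD (0, 0)) q)
    _ _ ?_ PySem.Set.empty p) ?_
  · intro s fp _ q
    refine Iff.trans (pvMemFoldl
      (fun i q => ∃ j ∈ PySem.List.pyRange (i + 1) (PySem.List.len fp.2) 1,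
        pvQA ((PySem.List.pyGet? fp.2 i).getD (0, 0)) ((PySem.List.pyGet? fp.2 j).getD (0, 0)) q)
      _ _ ?_ s q) Iff.rfl
    intro s' i _ q'
    refine Iff.trans (pvMemFoldl
      (fun j q' =>
        pvQA ((PySem.List.pyGet? fp.2 i).getD (0, 0)) ((PySem.List.pyGet? fp.2 j).getD (0, 0)) q')
      _ _ ?_ s' q') Iff.rfl
    intro s'' j _ q''
    exact pvBodyA s'' _ _ q''
  · constructor
    · rintro (h | ⟨fp, hfp, hidx⟩)
      · simp [PySem.Set.empty] at h
      · obtain ⟨c, hc, rfl⟩ := List.mem_map.mp hfp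
        exact ⟨c, hc, (pvIdxPairs (pvOccs md c) (pvPairwise_occs md c) _).mp hidx⟩
    · rintro ⟨c, hc, hpair⟩
      exact Or.inr ⟨(c, pvOccs md c), List.mem_map.mpr ⟨c, hc, rfl⟩,
        (pvIdxPairs (pvOccs md c) (pvPairwise_occs md c) _).mpr hpair⟩

lemma pvA_iff_emit (md : List String) (p : Int × Int) :
    (∃ c ∈ pvKeys md, ∃ a b, a ∈ pvOccs md c ∧ b ∈ pvOccs md c ∧ pvRmLt a b ∧ pvQA a b p) ↔
      pvEmitH md p ∨ pvEmitV md p := by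
  constructor
  · rintro ⟨c, _, a, b, ha, hb, hlt, hQ⟩
    obtain ⟨hne, hca⟩ := (pvMem_occs md c a).mp ha
    obtain ⟨_, hcb⟩ := (pvMem_occs md c b).mp hb
    unfold pvQA at hQ
    by_cases he : a.2 = b.2
    · rw [if_pos he] at hQ
      obtain ⟨hmod, hp⟩ := hQ
      have hx : a.1 < b.1 := by unfold pvRmLt at hlt; omega
      have habs : |b.1 - a.1| = b.1 - a.1 := abs_of_nonneg (by omega)
      rw [habs] at hmod hp
      exact Or.inl ⟨c, a.1, b.1, a.2, hne, hca, by rw [he]; exact hcb, hx, hmod, hp⟩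
    · rw [if_neg he] at hQ
      by_cases hx : a.1 = b.1
      · rw [if_pos hx] at hQ
        obtain ⟨hmod, hp⟩ := hQ
        have hy : a.2 < b.2 := by unfold pvRmLt at hlt; omega
        have habs : |b.2 - a.2| = b.2 - a.2 := abs_of_nonneg (by omega)
        rw [habs] at hmod hp
        exact Or.inr ⟨c, a.1, a.2, b.2, hne, hca, by rw [hx]; exact hcb, hy, hmod, hp⟩
      · rw [if_neg hx] at hQ
        exact hQ.elim
  · rintro (⟨c, x1, x2, y, hne, h1, h2, hlt, hmod, hp⟩ | ⟨c, x, y1, y2, hne, h1, h2, hlt, hmod, hp⟩)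
    · refine ⟨c, (pvMem_keys md c).mpr ⟨hne, x1, y, h1⟩, (x1, y), (x2, y),
        (pvMem_occs ..).mpr ⟨hne, h1⟩, (pvMem_occs ..).mpr ⟨hne, h2⟩, Or.inr ⟨rfl, hlt⟩, ?_⟩
      unfold pvQA
      rw [if_pos rfl]
      have habs : |(x2, y).1 - (x1, y).1| = x2 - x1 := by
        simp only []
        exact abs_of_nonneg (by omega)
      rw [habs]
      exact ⟨hmod, hp⟩
    · refine ⟨c, (pvMem_keys md c).mpr ⟨hne, x, y1, h1⟩, (x, y1), (x, y2),
        (pvMem_occs ..).mpr ⟨hne, h1⟩, (pvMem_occs ..).mpr ⟨hne, h2⟩, Or.inl hlt, ?_⟩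
      unfold pvQA
      rw [if_neg (by simp only []; omega), if_pos rfl]
      have habs : |(x, y2).2 - (x, y1).2| = y2 - y1 := by
        simp only []
        exact abs_of_nonneg (by omega)
      rw [habs]
      exact ⟨hmod, hp⟩

lemma pvStrGet (s : String) (i : Int) (h : 0 ≤ i) : PySem.Str.pyGet? s i = s.toList[i.toNat]? := by
  simp only [PySem.Str.pyGet?_eq, PySem.Chars.pyGet?_eq_listPyGet?]
  exact PySem.List.pyGet?_of_nonneg _ h

lemma pvBodyAdd2 (C : Prop) [Decidable C] (s : PySem.Set (Int × Int)) (u v p : Int × Int) :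
    (p ∈ if C then (s.add u).add v else s) ↔ p ∈ s ∨ (C ∧ (p = u ∨ p = v)) := by
  split_ifs with h <;> simp [PySem.Set.mem_add, h, or_assoc]

def pvPB (md : List String) (yr : Int × String) (xc : Int × Char) (p : Int × Int) : Prop :=
  ¬ xc.2 = '.' ∧
    ((∃ x2 ∈ PySem.List.pyRange (xc.1 + 1) (PySem.Str.len yr.2) 1,
        ((PySem.Str.pyGet? yr.2 x2).getD ' ' = xc.2 ∧ PySem.Int.mod (x2 - xc.1) 3 = 0) ∧
        (p = (xc.1 + PySem.Int.floordiv (x2 - xc.1) 3, yr.1) ∨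
         p = (x2 - PySem.Int.floordiv (x2 - xc.1) 3, yr.1))) ∨
     (∃ y2 ∈ PySem.List.pyRange (yr.1 + 1) (PySem.List.len md) 1,
        (xc.1 < PySem.Str.len ((PySem.List.pyGet? md y2).getD "") ∧
         (PySem.Str.pyGet? ((PySem.List.pyGet? md y2).getD "") xc.1).getD ' ' = xc.2 ∧
         PySem.Int.mod (y2 - yr.1) 3 = 0) ∧
        (p = (xc.1, yr.1 + PySem.Int.floordiv (y2 - yr.1) 3) ∨
         p = (xc.1, y2 - PySem.Int.floordiv (y2 - yr.1) 3))))

lemma pvBset_mem' (md : List String) (p : Int × Int) :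
    p ∈ pvBset md ↔
      ∃ yr ∈ PySem.List.enumerate md 0, ∃ xc ∈ PySem.List.enumerate yr.2.toList 0,
        pvPB md yr xc p := by
  simp only [pvBset]
  refine Iff.trans (pvMemFoldl
    (fun yr q => ∃ xc ∈ PySem.List.enumerate yr.2.toList 0, pvPB md yr xc q)
    _ _ ?_ PySem.Set.empty p) (by simp [PySem.Set.empty])
  intro s yr _ q
  refine Iff.trans (pvMemFoldl (fun xc q => pvPB md yr xc q) _ _ ?_ s q) Iff.rfl
  intro s' xc _ q'
  by_cases hdot : xc.2 = '.'
  · show q' ∈ (if xc.2 = '.' then s' else _) ↔ _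
    rw [if_pos hdot]
    simp [pvPB, hdot]
  · show q' ∈ (if xc.2 = '.' then s' else _) ↔ _
    rw [if_neg hdot]
    have hv := pvMemFoldl
      (fun y2 q'' =>
        (xc.1 < PySem.Str.len ((PySem.List.pyGet? md y2).getD "") ∧
         (PySem.Str.pyGet? ((PySem.List.pyGet? md y2).getD "") xc.1).getD ' ' = xc.2 ∧
         PySem.Int.mod (y2 - yr.1) 3 = 0) ∧
        (q'' = (xc.1, yr.1 + PySem.Int.floordiv (y2 - yr.1) 3) ∨
         q'' = (xc.1, y2 - PySem.Int.floordiv (y2 - yr.1) 3)))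
      (PySem.List.pyRange (yr.1 + 1) (PySem.List.len md) 1) _
      (fun s'' y2 _ q'' => pvBodyAdd2 _ s'' _ _ q'')
    have hh := pvMemFoldl
      (fun x2 q'' =>
        ((PySem.Str.pyGet? yr.2 x2).getD ' ' = xc.2 ∧ PySem.Int.mod (x2 - xc.1) 3 = 0) ∧
        (q'' = (xc.1 + PySem.Int.floordiv (x2 - xc.1) 3, yr.1) ∨
         q'' = (x2 - PySem.Int.floordiv (x2 - xc.1) 3, yr.1)))
      (PySem.List.pyRange (xc.1 + 1) (PySem.Str.len yr.2) 1) _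
      (fun s'' x2 _ q'' => pvBodyAdd2 _ s'' _ _ q'')
    rw [hv _ q', hh s' q']
    simp only [pvPB, hdot]
    simp only [not_false_iff, true_and, or_assoc]

lemma pvCellAt_iff (md : List String) (x y : Int) (c : Char) :
    pvCellAt md x y = some c ↔
      0 ≤ x ∧ 0 ≤ y ∧ ∃ row, md[y.toNat]? = some row ∧ row.toList[x.toNat]? = some c := by
  unfold pvCellAt
  by_cases hxy : 0 ≤ x ∧ 0 ≤ y
  · rw [if_pos hxy]
    rcases hrow : md[y.toNat]? with _ | row <;> simp [hxy.1, hxy.2]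
  · rw [if_neg hxy]
    constructor
    · intro h; simp at h
    · rintro ⟨hx, hy, _⟩; exact absurd ⟨hx, hy⟩ hxy

lemma pvB_iff_emit (md : List String) (p : Int × Int) :
    (∃ yr ∈ PySem.List.enumerate md 0, ∃ xc ∈ PySem.List.enumerate yr.2.toList 0,
        pvPB md yr xc p) ↔ pvEmitH md p ∨ pvEmitV md p := by
  constructor
  · rintro ⟨yr, hyr, xc, hxc, hPB⟩
    obtain ⟨k, hk, rfl⟩ := (PySem.List.mem_enumerate_iff md 0 yr).mp hyr
    obtain ⟨kx, hkx, rfl⟩ := (PySem.List.mem_enumerate_iff _ 0 xc).mp hxc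
    obtain ⟨hdot, hcase⟩ := hPB
    simp only [zero_add] at hdot hcase ⊢
    have hcell1 : pvCellAt md (kx : Int) (k : Int) = some md[k].toList[kx] := by
      rw [pvCellAt_iff]
      exact ⟨by omega, by omega, md[k],
        by simp [hk], by simp⟩
    rcases hcase with ⟨x2, hx2r, ⟨hget, hmod⟩, hp⟩ | ⟨y2, hy2r, ⟨hlen2, hget2, hmod⟩, hp⟩
    · rw [PySem.List.mem_pyRange_one] at hx2r
      rw [PySem.Str.len_eq] at hx2r
      have hx2n : x2.toNat < md[k].toList.length := by omega
      rw [pvStrGet _ _ (by omega), List.getElem?_eq_getElem hx2n] at hget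
      simp only [Option.getD_some] at hget
      have hcell2 : pvCellAt md x2 (k : Int) = some md[k].toList[kx] := by
        rw [pvCellAt_iff]
        exact ⟨by omega, by omega, md[k],
          by simp [hk],
          by rw [List.getElem?_eq_getElem hx2n, hget]⟩
      exact Or.inl ⟨md[k].toList[kx], (kx : Int), x2, (k : Int), hdot, hcell1, hcell2,
        by omega, hmod, hp⟩
    · rw [PySem.List.mem_pyRange_one] at hy2r
      rw [PySem.List.len_eq] at hy2r
      have hy2n : y2.toNat < md.length := by omega
      have hrow2 : (PySem.List.pyGet? md y2).getD "" = md[y2.toNat] := by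
        rw [PySem.List.pyGet?_of_nonneg md (by omega), List.getElem?_eq_getElem hy2n]
        rfl
      rw [hrow2] at hlen2 hget2
      rw [PySem.Str.len_eq] at hlen2
      have hxn : (kx : Int).toNat < md[y2.toNat].toList.length := by omega
      rw [pvStrGet _ _ (by omega), List.getElem?_eq_getElem hxn] at hget2
      simp only [Option.getD_some] at hget2
      have hcell2 : pvCellAt md (kx : Int) y2 = some md[k].toList[kx] := by
        rw [pvCellAt_iff]
        exact ⟨by omega, by omega, md[y2.toNat],
          by rw [List.getElem?_eq_getElem hy2n],
          by rw [List.getElem?_eq_getElem hxn, hget2]⟩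
      exact Or.inr ⟨md[k].toList[kx], (kx : Int), (k : Int), y2, hdot, hcell1, hcell2,
        by omega, hmod, hp⟩
  · rintro (⟨c, x1, x2, y, hne, h1, h2, hlt, hmod, hp⟩ | ⟨c, x, y1, y2, hne, h1, h2, hlt, hmod, hp⟩)
    · obtain ⟨hx1, hy, row, hrow, hc1⟩ := (pvCellAt_iff md x1 y c).mp h1
      obtain ⟨hx2, _, row', hrow', hc2⟩ := (pvCellAt_iff md x2 y c).mp h2
      rw [hrow] at hrow'
      obtain rfl : row = row' := by injection hrow'
      refine ⟨(y, row), ?_, (x1, c), ?_, ?_⟩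
      · rw [PySem.List.mem_enumerate_iff]
        exact ⟨y.toNat, (List.getElem?_eq_some_iff.mp hrow).1, by
          simp [Int.toNat_of_nonneg hy, (List.getElem?_eq_some_iff.mp hrow).2]⟩
      · rw [PySem.List.mem_enumerate_iff]
        exact ⟨x1.toNat, (List.getElem?_eq_some_iff.mp hc1).1, by
          simp [Int.toNat_of_nonneg hx1, (List.getElem?_eq_some_iff.mp hc1).2]⟩
      · refine ⟨hne, Or.inl ⟨x2, ?_, ⟨?_, hmod⟩, hp⟩⟩
        · rw [PySem.List.mem_pyRange_one, PySem.Str.len_eq]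
          have := (List.getElem?_eq_some_iff.mp hc2).1
          dsimp only
          omega
        · rw [pvStrGet _ _ (by omega), hc2]
          rfl
    · obtain ⟨hx, hy1, row, hrow, hc1⟩ := (pvCellAt_iff md x y1 c).mp h1
      obtain ⟨_, hy2, row2, hrow2, hc2⟩ := (pvCellAt_iff md x y2 c).mp h2
      refine ⟨(y1, row), ?_, (x, c), ?_, ?_⟩
      · rw [PySem.List.mem_enumerate_iff]
        exact ⟨y1.toNat, (List.getElem?_eq_some_iff.mp hrow).1, by
          simp [Int.toNat_of_nonneg hy1, (List.getElem?_eq_some_iff.mp hrow).2]⟩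
      · rw [PySem.List.mem_enumerate_iff]
        exact ⟨x.toNat, (List.getElem?_eq_some_iff.mp hc1).1, by
          simp [Int.toNat_of_nonneg hx, (List.getElem?_eq_some_iff.mp hc1).2]⟩
      · refine ⟨hne, Or.inr ⟨y2, ?_, ⟨?_, ?_, hmod⟩, hp⟩⟩
        · rw [PySem.List.mem_pyRange_one, PySem.List.len_eq]
          have := (List.getElem?_eq_some_iff.mp hrow2).1
          omega
        · rw [PySem.List.pyGet?_of_nonneg md (by omega), hrow2]
          simp only [Option.getD_some, PySem.Str.len_eq]
          have := (List.getElem?_eq_some_iff.mp hc2).1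
          omega
        · rw [PySem.List.pyGet?_of_nonneg md (by omega), hrow2]
          simp only [Option.getD_some]
          rw [pvStrGet _ _ (by omega), hc2]
          rfl

lemma pvAset_nodup (md : List String) : (pvAset md).Nodup := by
  simp only [pvAset]
  refine pvNodupFoldl _ _ ?_ _ List.nodup_nil
  intro s fp hs
  refine pvNodupFoldl _ _ ?_ _ hs
  intro s i hs
  refine pvNodupFoldl _ _ ?_ _ hs
  intro s j hs
  dsimp only
  split_ifs <;> first
    | exact hs
    | exact PySem.Set.nodup_add _ _ (PySem.Set.nodup_add _ _ hs)

lemma pvBset_nodup (md : List String) : (pvBset md).Nodup := by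
  simp only [pvBset]
  refine pvNodupFoldl _ _ ?_ _ List.nodup_nil
  intro s yr hs
  refine pvNodupFoldl _ _ ?_ _ hs
  intro s xc hs
  dsimp only
  split_ifs with h
  · exact hs
  · refine pvNodupFoldl _ _ ?_ _ (pvNodupFoldl _ _ ?_ _ hs) <;>
      · intro s' z hs'
        dsimp only
        split_ifs <;> first
          | exact hs'
          | exact PySem.Set.nodup_add _ _ (PySem.Set.nodup_add _ _ hs')

lemma pvMain (md : List String) : count_unique_antinodes md = count_unique_antinodes_alt md := by
  rw [pvAset_spec, pvBset_spec, PySem.List.foldl_ite_add_one]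
  have hA : ((pvAset md).filter (fun p => decide (0 ≤ p.1 ∧
      p.1 < PySem.Str.len ((PySem.List.pyGet? md 0).getD "") ∧
      0 ≤ p.2 ∧ p.2 < PySem.List.len md))).Nodup := (pvAset_nodup md).filter _
  rw [PySem.Set.ofList_eq_self_of_nodup _ hA, PySem.List.len_eq, List.countP_eq_length_filter]
  have hmem : ∀ a, a ∈ pvAset md ↔ a ∈ pvBset md := fun a =>
    (pvAset_mem md a).trans ((pvA_iff_emit md a).trans
      ((pvB_iff_emit md a).symm.trans (pvBset_mem' md a).symm))
  have hB : ((pvBset md).filter (fun p => decide (0 ≤ p.1 ∧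
      p.1 < PySem.Str.len ((PySem.List.pyGet? md 0).getD "") ∧
      0 ≤ p.2 ∧ p.2 < PySem.List.len md))).Nodup := (pvBset_nodup md).filter _
  have hperm := (List.perm_ext_iff_of_nodup hA hB).mpr
    (fun a => by simp only [List.mem_filter, hmem])
  rw [hperm.length_eq]
  omega


-- ===== VERDICT (by name: the statement is the Claim_ definition above) =====
theorem count_unique_antinodes_spec : Claim_equal_count_unique_antinodes := by
  intro md _ _
  unfold Spec_count_unique_antinodes
  exact pvMain md
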